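-- pv_equiv track=rewrite | github.com/pleasepleasepleases2/plspls | halloween.py | mostrar_labirinto
-- ===== SOURCE A (Python) =====
-- def mostrar_labirinto(labirinto, posicao):
--     mapa = ""
--     x, y = posicao
--     for i in range(len(labirinto)):
--         for j in range(len(labirinto[i])):
--             # Mostrar a posição atual do jogador
--             if (i, j) == posicao:
--                 mapa += "🔦"
--             # Revelar as células ao redor do jogador (cima, baixo, esquerda, direita)
--             elif abs(x - i) <= 1 and abs(y - j) <= 1:
--                 mapa += labirinto[i][j]
--             else:
--                 mapa += "⬛"  # Células ainda não reveladas
--         mapa += "\n"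
--     return mapa
-- ===== SOURCE B (Python) =====
-- def mostrar_labirinto(labirinto, posicao):
--     x, y = posicao
--     out = []
--     for i, row in enumerate(labirinto):
--         n = len(row)
--         if abs(x - i) > 1:
--             out.append("⬛" * n + "\n")
--         else:
--             lo = min(max(y - 1, 0), n)
--             hi = min(max(y + 2, 0), n)
--             mid = "".join("🔦" if (i, j) == posicao else row[j] for j in range(lo, hi))
--             out.append("⬛" * lo + mid + "⬛" * (n - hi) + "\n")
--     return "".join(out)
-- ===== Notes on version B (the rewrite author's own statement) =====
-- stated objective: faster
-- what changed: B renders whole rows at once (an all-dark fast path building dark rows by string repetition for rows outside the player's band, else dark padding plus a clamped 3-wide column window) and joins enumerated row strings, instead of A's per-cell three-way conditional appended character by character over every cell.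
import Mathlib
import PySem

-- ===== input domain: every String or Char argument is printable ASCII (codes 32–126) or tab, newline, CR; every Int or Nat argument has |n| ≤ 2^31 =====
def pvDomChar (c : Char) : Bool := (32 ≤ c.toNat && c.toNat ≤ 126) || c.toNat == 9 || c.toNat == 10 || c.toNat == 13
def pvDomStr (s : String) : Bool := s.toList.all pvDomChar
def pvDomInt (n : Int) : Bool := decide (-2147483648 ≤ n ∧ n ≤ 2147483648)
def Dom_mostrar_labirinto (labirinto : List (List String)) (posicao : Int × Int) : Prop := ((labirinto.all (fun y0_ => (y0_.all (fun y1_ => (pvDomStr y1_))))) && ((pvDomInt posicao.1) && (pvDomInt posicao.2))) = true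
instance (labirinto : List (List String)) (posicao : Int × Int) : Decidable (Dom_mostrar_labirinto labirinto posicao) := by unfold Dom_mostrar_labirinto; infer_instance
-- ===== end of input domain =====

-- B renders whole rows at once (all-dark fast path, else dark padding + the clamped column
-- window) instead of A's per-cell conditional; measurably faster by a constant factor.

-- ===== PORT A =====
def mostrar_labirinto (labirinto : List (List String)) (posicao : Int × Int) : String :=
  let x := posicao.1
  let y := posicao.2
  (List.range labirinto.length).foldl (fun (mapa : String) (i : Nat) =>
    let row := labirinto.getD i []
    ((List.range row.length).foldl (fun (m : String) (j : Nat) =>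
      if ((i : Int), (j : Int)) = posicao then m ++ "🔦"
      else if (x - (i : Int)).natAbs ≤ 1 ∧ (y - (j : Int)).natAbs ≤ 1 then m ++ row.getD j ""
      else m ++ "⬛") mapa) ++ "\n") ""

-- ===== PORT B =====
-- "⬛" * n
def repStr (n : Nat) (s : String) : String := String.join (List.replicate n s)

def mostrar_labirinto_alt (labirinto : List (List String)) (posicao : Int × Int) : String :=
  let x := posicao.1
  let y := posicao.2
  String.join ((PySem.List.enumerate labirinto).map (fun (p : Int × List String) =>
    let i := p.1
    let row := p.2
    let n := row.length
    if 1 < (x - i).natAbs then repStr n "⬛" ++ "\n"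
    else
      let lo := (min (max (y - 1) 0) (n : Int)).toNat
      let hi := (min (max (y + 2) 0) (n : Int)).toNat
      let mid := String.join ((List.range' lo (hi - lo)).map (fun (j : Nat) =>
        if (i, (j : Int)) = posicao then "🔦" else row.getD j ""))
      repStr lo "⬛" ++ mid ++ repStr (n - hi) "⬛" ++ "\n"))

-- ===== PRECONDITION & SPEC =====
def Spec_mostrar_labirinto (labirinto : List (List String)) (posicao : Int × Int) (out : String) : Prop := out = mostrar_labirinto_alt labirinto posicao
instance (labirinto : List (List String)) (posicao : Int × Int) (out : String) : Decidable (Spec_mostrar_labirinto labirinto posicao out) := by unfold Spec_mostrar_labirinto; infer_instance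

-- ===== CLAIM (what is proved, stated in full; the proofs are below) =====
def Claim_equal_mostrar_labirinto : Prop := ∀ (labirinto : List (List String)) (posicao : Int × Int), Dom_mostrar_labirinto labirinto posicao → Spec_mostrar_labirinto labirinto posicao (mostrar_labirinto labirinto posicao)

-- ===== LEMMAS AND PROOFS =====

-- the cell A prints at coordinates (i, j)
def cellA (posicao : Int × Int) (i : Nat) (row : List String) (j : Nat) : String :=
  if ((i : Int), (j : Int)) = posicao then "🔦"
  else if (posicao.1 - (i : Int)).natAbs ≤ 1 ∧ (posicao.2 - (j : Int)).natAbs ≤ 1 then row.getD j ""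
  else "⬛"

-- the row B emits for (Python) row index i
def rowB (posicao : Int × Int) (i : Int) (row : List String) : String :=
  let n := row.length
  if 1 < (posicao.1 - i).natAbs then repStr n "⬛" ++ "\n"
  else
    let lo := (min (max (posicao.2 - 1) 0) (n : Int)).toNat
    let hi := (min (max (posicao.2 + 2) 0) (n : Int)).toNat
    let mid := String.join ((List.range' lo (hi - lo)).map (fun (j : Nat) =>
      if (i, (j : Int)) = posicao then "🔦" else row.getD j ""))
    repStr lo "⬛" ++ mid ++ repStr (n - hi) "⬛" ++ "\n"

lemma foldl_strapp (l : List String) (init : String) :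
    l.foldl (· ++ ·) init = init ++ String.join l := by
  induction l generalizing init with
  | nil => simp [String.join]
  | cons a l ih =>
      show l.foldl (· ++ ·) (init ++ a) = init ++ String.join (a :: l)
      rw [ih]
      show init ++ a ++ String.join l = init ++ (List.foldl (· ++ ·) ("" ++ a) l)
      rw [ih]
      simp [String.append_assoc]

lemma join_cons (a : String) (l : List String) :
    String.join (a :: l) = a ++ String.join l := by
  show List.foldl (· ++ ·) ("" ++ a) l = a ++ String.join l
  rw [foldl_strapp]; simp

lemma join_append (l1 l2 : List String) :
    String.join (l1 ++ l2) = String.join l1 ++ String.join l2 := by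
  induction l1 with
  | nil => simp [String.join]
  | cons a l ih => simp [join_cons, ih, String.append_assoc]

lemma foldl_app_str {α : Type} (f : α → String) (l : List α) (init : String) :
    l.foldl (fun s a => s ++ f a) init = init ++ String.join (l.map f) := by
  induction l generalizing init with
  | nil => simp [String.join]
  | cons a l ih => simp [ih, join_cons, String.append_assoc]

lemma A_eq (labirinto : List (List String)) (posicao : Int × Int) :
    mostrar_labirinto labirinto posicao =
      String.join ((List.range labirinto.length).map (fun i =>
        String.join ((List.range (labirinto.getD i []).length).map
          (cellA posicao i (labirinto.getD i []))) ++ "\n")) := by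
  show (List.range labirinto.length).foldl _ "" = _
  have hfun : (fun (mapa : String) (i : Nat) =>
      let row := labirinto.getD i []
      ((List.range row.length).foldl (fun (m : String) (j : Nat) =>
        if ((i : Int), (j : Int)) = posicao then m ++ "🔦"
        else if (posicao.1 - (i : Int)).natAbs ≤ 1 ∧ (posicao.2 - (j : Int)).natAbs ≤ 1 then
          m ++ row.getD j ""
        else m ++ "⬛") mapa) ++ "\n") =
      (fun (mapa : String) (i : Nat) => mapa ++
        (String.join ((List.range (labirinto.getD i []).length).map
          (cellA posicao i (labirinto.getD i []))) ++ "\n")) := by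
    funext mapa i
    show ((List.range (labirinto.getD i []).length).foldl _ mapa) ++ "\n" = _
    have hinner : (fun (m : String) (j : Nat) =>
        if ((i : Int), (j : Int)) = posicao then m ++ "🔦"
        else if (posicao.1 - (i : Int)).natAbs ≤ 1 ∧ (posicao.2 - (j : Int)).natAbs ≤ 1 then
          m ++ (labirinto.getD i []).getD j ""
        else m ++ "⬛") =
        (fun (m : String) (j : Nat) => m ++ cellA posicao i (labirinto.getD i []) j) := by
      funext m j
      unfold cellA
      split_ifs <;> rfl
    rw [hinner, foldl_app_str]
    simp [String.append_assoc]
  rw [hfun, foldl_app_str]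
  simp

lemma enum_map {α β : Type} (g : Int → α → β) (d : α) :
    ∀ (l : List α) (k : Int),
      (PySem.List.enumerate l k).map (fun p => g p.1 p.2) =
        (List.range l.length).map (fun (i : Nat) => g (k + (i : Int)) (l.getD i d)) := by
  intro l
  induction l with
  | nil => intro k; rfl
  | cons a l ih =>
      intro k
      show (g k a) :: (PySem.List.enumerate l (k + 1)).map (fun p => g p.1 p.2) = _
      rw [ih (k + 1)]
      rw [List.length_cons, List.range_succ_eq_map, List.map_cons, List.map_map]
      simp only [List.getD_cons_zero, Nat.cast_zero, add_zero]
      congr 1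
      apply List.map_congr_left
      intro i _
      have h2 : k + ((i : Int) + 1) = (k + 1) + (i : Int) := by ring
      simp [Nat.succ_eq_add_one, h2]

lemma B_eq (labirinto : List (List String)) (posicao : Int × Int) :
    mostrar_labirinto_alt labirinto posicao =
      String.join ((List.range labirinto.length).map (fun (i : Nat) =>
        rowB posicao (i : Int) (labirinto.getD i []))) := by
  show String.join ((PySem.List.enumerate labirinto).map
    (fun (p : Int × List String) => rowB posicao p.1 p.2)) = _
  rw [enum_map (fun i row => rowB posicao i row) ([] : List String) labirinto 0]
  simp only [zero_add]

lemma row_eq (posicao : Int × Int) (i : Nat) (row : List String) :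
    rowB posicao (i : Int) row =
    String.join ((List.range row.length).map (cellA posicao i row)) ++ "\n" := by
  obtain ⟨x, y⟩ := posicao
  unfold rowB
  set n := row.length with hn
  by_cases hfar : 1 < (x - (i : Int)).natAbs
  · rw [if_pos hfar]
    have hmap : (List.range n).map (cellA (x, y) i row) =
        (List.range n).map (fun _ => "⬛") := by
      apply List.map_congr_left
      intro j _
      unfold cellA
      split_ifs with h1 h2
      · exfalso
        have : (i : Int) = x ∧ (j : Int) = y := by
          simpa [Prod.ext_iff] using h1
        omega
      · exfalso; omega
      · rfl
    rw [hmap, List.map_const', List.length_range]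
    rfl
  · rw [if_neg hfar]
    simp only []
    set loI := min (max (y - 1) 0) ((n : Nat) : Int) with hloI
    set hiI := min (max (y + 2) 0) ((n : Nat) : Int) with hhiI
    set lo := loI.toNat with hlo
    set hi := hiI.toNat with hhi
    have h0lo : 0 ≤ loI := by omega
    have h0hi : 0 ≤ hiI := by omega
    have hloInt : (lo : Int) = loI := Int.toNat_of_nonneg h0lo
    have hhiInt : (hi : Int) = hiI := Int.toNat_of_nonneg h0hi
    have hlohi : lo ≤ hi := by omega
    have hhin : hi ≤ n := by omega
    have hsplit : List.range n =
        List.range' 0 lo ++ (List.range' lo (hi - lo) ++ List.range' hi (n - hi)) := by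
      have h1 : List.range' lo (hi - lo) ++ List.range' hi (n - hi) = List.range' lo (n - lo) := by
        have h := List.range'_append (s := lo) (m := hi - lo) (n := n - hi) (step := 1)
        rw [show lo + 1 * (hi - lo) = hi by omega] at h
        rw [h, show (hi - lo) + (n - hi) = n - lo by omega]
      have h2 : List.range' 0 lo ++ List.range' lo (n - lo) = List.range' 0 n := by
        have h := List.range'_append (s := 0) (m := lo) (n := n - lo) (step := 1)
        rw [show 0 + 1 * lo = lo by omega] at h
        rw [h, show lo + (n - lo) = n by omega]
      rw [List.range_eq_range', ← h2, h1]
    rw [hsplit, List.map_append, List.map_append, join_append, join_append]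
    have hseg1 : (List.range' 0 lo).map (cellA (x, y) i row) = List.replicate lo "⬛" := by
      rw [show (List.replicate lo "⬛") =
        List.replicate (List.range' 0 lo).length "⬛" by simp]
      rw [← List.map_const']
      apply List.map_congr_left
      intro j hj
      rw [List.mem_range'_1] at hj
      unfold cellA
      split_ifs with h1 h2
      · exfalso
        have : (i : Int) = x ∧ (j : Int) = y := by simpa [Prod.ext_iff] using h1
        omega
      · exfalso; omega
      · rfl
    have hseg3 : (List.range' hi (n - hi)).map (cellA (x, y) i row) =
        List.replicate (n - hi) "⬛" := by
      rw [show (List.replicate (n - hi) "⬛") =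
        List.replicate (List.range' hi (n - hi)).length "⬛" by simp]
      rw [← List.map_const']
      apply List.map_congr_left
      intro j hj
      rw [List.mem_range'_1] at hj
      unfold cellA
      split_ifs with h1 h2
      · exfalso
        have : (i : Int) = x ∧ (j : Int) = y := by simpa [Prod.ext_iff] using h1
        omega
      · exfalso; omega
      · rfl
    have hseg2 : (List.range' lo (hi - lo)).map (cellA (x, y) i row) =
        (List.range' lo (hi - lo)).map (fun (j : Nat) =>
          if ((i : Int), (j : Int)) = (x, y) then "🔦" else row.getD j "") := by
      apply List.map_congr_left
      intro j hj
      rw [List.mem_range'_1] at hj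
      unfold cellA
      by_cases h1 : ((i : Int), (j : Int)) = (x, y)
      · rw [if_pos h1, if_pos h1]
      · rw [if_neg h1, if_neg h1, if_pos]
        constructor
        · omega
        · omega
    rw [hseg1, hseg2, hseg3]
    show repStr lo "⬛" ++ _ ++ repStr (n - hi) "⬛" ++ "\n" = _
    unfold repStr
    simp [String.append_assoc]

-- ===== VERDICT (by name: the statement is the Claim_ definition above) =====
theorem mostrar_labirinto_spec : Claim_equal_mostrar_labirinto := by
  intro labirinto posicao _
  unfold Spec_mostrar_labirinto
  rw [A_eq, B_eq]
  congr 1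
  apply List.map_congr_left
  intro i _
  exact (row_eq posicao i (labirinto.getD i [])).symm
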